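-- pv_equiv track=rewrite | github.com/Chingackgook/Inspection_release | Inspection/utils/interface_writer.py | spit_txt
-- ===== SOURCE A (Python) =====
-- def spit_txt(str:str):
--     # 将txt文件中的内容按$$$分割
--     lines = str.split('\n')
--     result = []
--     tempresult = ''
--     for line in lines:
--         if not line.startswith('$$$'):
--             tempresult += line + '\n'
--         else:
--             result.append(tempresult)
--             tempresult = ''
--     result.append(tempresult)
--     return result
-- ===== SOURCE B (Python) =====
-- def spit_txt(str):
--     # Backward pass: build the segment list back-to-front, prepending lines
--     # to the current (first) segment and opening a new empty segment at each
--     # '$$$' delimiter line.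
--     out = ['']
--     for line in reversed(str.split('\n')):
--         if line.startswith('$$$'):
--             out.insert(0, '')
--         else:
--             out[0] = line + '\n' + out[0]
--     return out
-- ===== Notes on version B (the rewrite author's own statement) =====
-- stated objective: alternative
-- what changed: B traverses the lines in reverse and builds the segment list back-to-front (prepending lines to the current first segment, opening a new segment at each '$$$' line), instead of A's forward accumulation with a temp buffer flushed on each delimiter.
import Mathlib
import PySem

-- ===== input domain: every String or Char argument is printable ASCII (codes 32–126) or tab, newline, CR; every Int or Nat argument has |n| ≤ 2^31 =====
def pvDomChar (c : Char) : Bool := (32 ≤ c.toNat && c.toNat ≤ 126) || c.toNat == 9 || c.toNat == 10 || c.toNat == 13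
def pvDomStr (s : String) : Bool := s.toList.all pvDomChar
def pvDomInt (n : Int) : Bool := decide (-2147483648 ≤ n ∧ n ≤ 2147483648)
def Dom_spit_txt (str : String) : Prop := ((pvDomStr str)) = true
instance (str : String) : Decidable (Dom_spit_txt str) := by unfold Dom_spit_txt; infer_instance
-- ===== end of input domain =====

-- B replaces A's forward accumulation with a backward pass that builds the
-- segment list back-to-front (alternative decomposition; same return value).

-- ===== PORT A =====
-- literal port of A: forward foldl over the lines with state (result, tempresult)
def spit_txt (str : String) : List String :=
  let lines := (PySem.Str.split? str "\n").getD []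
  let st := lines.foldl
    (fun (st : List String × String) line =>
      if ¬ (PySem.Str.startswith line "$$$") then (st.1, st.2 ++ (line ++ "\n"))
      else (st.1 ++ [st.2], "")) ([], "")
  st.1 ++ [st.2]

-- ===== PORT B =====
-- literal port of B: loop over reversed lines; out.insert(0, '') opens a new
-- segment, out[0] = line + '\n' + out[0] prepends to the first segment
def spit_txt_alt (str : String) : List String :=
  ((PySem.Str.split? str "\n").getD []).reverse.foldl
    (fun out line =>
      if PySem.Str.startswith line "$$$" then "" :: out
      else
        match out with
        | h :: t => ((line ++ "\n") ++ h) :: t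
        | [] => []) [""]

-- ===== PRECONDITION & SPEC =====
def Spec_spit_txt (str : String) (out : List String) : Prop := out = spit_txt_alt str
instance (str : String) (out : List String) : Decidable (Spec_spit_txt str out) := by unfold Spec_spit_txt; infer_instance

-- ===== CLAIM (what is proved, stated in full; the proofs are below) =====
def Claim_equal_spit_txt : Prop := ∀ (str : String), Dom_spit_txt str → Spec_spit_txt str (spit_txt str)

-- ===== LEMMAS AND PROOFS =====

-- B's right-fold step (what the reversed foldl computes, via List.foldl_reverse)
def pvSegStep (line : String) (out : List String) : List String :=
  if PySem.Str.startswith line "$$$" then "" :: out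
  else
    match out with
    | h :: t => ((line ++ "\n") ++ h) :: t
    | [] => []

lemma pvSeg_ne_nil (ls : List String) : ls.foldr pvSegStep [""] ≠ [] := by
  induction ls with
  | nil => simp
  | cons l ls ih =>
    simp only [List.foldr, pvSegStep]
    split
    · simp
    · obtain ⟨h, t, hht⟩ : ∃ h t, ls.foldr pvSegStep [""] = h :: t := by
        cases hx : ls.foldr pvSegStep [""] with
        | nil => exact absurd hx ih
        | cons h t => exact ⟨h, t, rfl⟩
      simp [hht]

lemma pvMain (ls : List String) (res : List String) (temp : String) :
    (ls.foldl
      (fun (st : List String × String) line =>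
        if ¬ (PySem.Str.startswith line "$$$") then (st.1, st.2 ++ (line ++ "\n"))
        else (st.1 ++ [st.2], "")) (res, temp)).1
    ++ [(ls.foldl
      (fun (st : List String × String) line =>
        if ¬ (PySem.Str.startswith line "$$$") then (st.1, st.2 ++ (line ++ "\n"))
        else (st.1 ++ [st.2], "")) (res, temp)).2]
    = res ++ (match ls.foldr pvSegStep [""] with
              | h :: t => (temp ++ h) :: t
              | [] => []) := by
  induction ls generalizing res temp with
  | nil => simp
  | cons l ls ih =>
    obtain ⟨h, t, hht⟩ : ∃ h t, ls.foldr pvSegStep [""] = h :: t := by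
      cases hx : ls.foldr pvSegStep [""] with
      | nil => exact absurd hx (pvSeg_ne_nil ls)
      | cons h t => exact ⟨h, t, rfl⟩
    by_cases hd : PySem.Str.startswith l "$$$" = true
    · simp only [List.foldl_cons, List.foldr_cons, pvSegStep, hd, not_true_eq_false,
        ite_false, ite_true]
      rw [ih]
      simp [hht]
    · simp only [List.foldl_cons, List.foldr_cons, pvSegStep, hd]
      rw [ih]
      simp [hht, String.append_assoc]

-- ===== VERDICT (by name: the statement is the Claim_ definition above) =====
theorem spit_txt_spec : Claim_equal_spit_txt := by
  intro str _
  unfold Spec_spit_txt spit_txt spit_txt_alt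
  simp only [List.foldl_reverse]
  have hfr : ∀ (ls : List String),
      ls.foldr (fun x y =>
        if PySem.Str.startswith x "$$$" then "" :: y
        else
          match y with
          | h :: t => ((x ++ "\n") ++ h) :: t
          | [] => []) [""] = ls.foldr pvSegStep [""] := by
    intro ls; rfl
  rw [hfr, pvMain]
  obtain ⟨h, t, hht⟩ : ∃ h t,
      ((PySem.Str.split? str "\n").getD []).foldr pvSegStep [""] = h :: t := by
    cases hx : ((PySem.Str.split? str "\n").getD []).foldr pvSegStep [""] with
    | nil => exact absurd hx (pvSeg_ne_nil _)
    | cons h t => exact ⟨h, t, rfl⟩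
  simp [hht]
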